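-- pv_equiv track=rewrite | github.com/makebestdeal-source/adscope | crawler/kakao_da.py | _is_infra_domain
-- ===== SOURCE A (Python) =====
-- _INFRA_DOMAINS = {
--     # 광고 시스템 도메인 (광고주 아님)
--     "doubleclick.net", "googlesyndication.com", "googleadservices.com",
--     "adservice.google.com", "pagead2.googlesyndication.com",
--     "ad.daum.net", "kakaoad.com", "adfit.kakao.com",
--     "t1.daumcdn.net", "t1.kakaocdn.net",
--     "adcr.naver.com", "ader.naver.com",
--     "criteo.com", "adroll.com", "taboola.com", "dable.io",
--     # 매체 도메인 (매체는 광고주 아님)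
--     "www.daum.net", "m.daum.net", "news.daum.net", "finance.daum.net",
--     "sports.daum.net", "entertain.daum.net",
--     "www.naver.com", "m.naver.com",
-- }
--
-- def _is_infra_domain(domain: str | None) -> bool:
--     """도메인이 광고 인프라/매체인지 확인 — 광고주로 사용 불가."""
--     if not domain:
--         return True
--     d = domain.lower().strip()
--     for infra in _INFRA_DOMAINS:
--         if d == infra or d.endswith("." + infra):
--             return True
--     return False
-- ===== SOURCE B (Python) =====
-- _INFRA_DOMAINS = {
--     "doubleclick.net", "googlesyndication.com", "googleadservices.com",
--     "adservice.google.com", "pagead2.googlesyndication.com",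
--     "ad.daum.net", "kakaoad.com", "adfit.kakao.com",
--     "t1.daumcdn.net", "t1.kakaocdn.net",
--     "adcr.naver.com", "ader.naver.com",
--     "criteo.com", "adroll.com", "taboola.com", "dable.io",
--     "www.daum.net", "m.daum.net", "news.daum.net", "finance.daum.net",
--     "sports.daum.net", "entertain.daum.net",
--     "www.naver.com", "m.naver.com",
-- }
--
--
-- def _is_infra_domain(domain):
--     """Suffix lookup: enumerate d's dot-boundary suffixes and test set membership."""
--     if not domain:
--         return True
--     d = domain.lower().strip()
--     suffixes = [d] + [d[i + 1:] for i, ch in enumerate(d) if ch == "."]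
--     return any(s in _INFRA_DOMAINS for s in suffixes)
-- ===== Notes on version B (the rewrite author's own statement) =====
-- stated objective: alternative
-- what changed: Instead of scanning all 24 infra entries doing string-equality/endswith comparisons, B enumerates the input's dot-boundary suffixes once and tests each for set membership, inverting the traversal (over the input's labels, not over the table).
import Mathlib
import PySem

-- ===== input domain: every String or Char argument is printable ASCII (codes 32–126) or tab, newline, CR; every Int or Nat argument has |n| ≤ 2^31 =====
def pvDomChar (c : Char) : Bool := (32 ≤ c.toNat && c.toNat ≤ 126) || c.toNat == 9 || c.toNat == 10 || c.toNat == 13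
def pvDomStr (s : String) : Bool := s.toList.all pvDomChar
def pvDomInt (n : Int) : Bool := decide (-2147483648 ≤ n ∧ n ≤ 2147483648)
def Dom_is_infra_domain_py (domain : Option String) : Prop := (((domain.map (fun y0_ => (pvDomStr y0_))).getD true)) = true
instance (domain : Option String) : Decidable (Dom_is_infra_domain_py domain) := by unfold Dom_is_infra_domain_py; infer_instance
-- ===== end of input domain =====

-- B inverts the traversal: it enumerates the input's dot-boundary suffixes and looks each up
-- in the infra set, instead of scanning every infra entry with equality/endswith tests (alternative; same result).

-- the module constant _INFRA_DOMAINS (a Python set of distinct strings), shared by both ports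
def pvInfra : List String :=
  ["doubleclick.net", "googlesyndication.com", "googleadservices.com",
   "adservice.google.com", "pagead2.googlesyndication.com",
   "ad.daum.net", "kakaoad.com", "adfit.kakao.com",
   "t1.daumcdn.net", "t1.kakaocdn.net",
   "adcr.naver.com", "ader.naver.com",
   "criteo.com", "adroll.com", "taboola.com", "dable.io",
   "www.daum.net", "m.daum.net", "news.daum.net", "finance.daum.net",
   "sports.daum.net", "entertain.daum.net",
   "www.naver.com", "m.naver.com"]

-- ===== PORT A =====
def is_infra_domain_py (domain : Option String) : Bool :=
  match domain with
  | none => true                                   -- `if not domain: return True` (None)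
  | some s =>
    if s == "" then true                           -- `if not domain: return True` ("" is falsy)
    else
      let d := PySem.Str.strip (PySem.Str.lower s)
      -- `for infra in _INFRA_DOMAINS: if d == infra or d.endswith("." + infra): return True` / `return False`
      pvInfra.any (fun infra => d == infra || PySem.Str.endswith d ("." ++ infra))

-- ===== PORT B =====
-- `[d[i + 1:] for i, ch in enumerate(d) if ch == "."]`; d[i+1:] with i ≥ 0 is PySem.List.slice from i+1
def pvDotSuffixes (d : List Char) : List (List Char) :=
  (((PySem.List.enumerate d).filter (fun p => p.2 == '.')).map
    (fun p => PySem.List.slice d (some (p.1 + 1)) none))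

def is_infra_domain_py_alt (domain : Option String) : Bool :=
  match domain with
  | none => true
  | some s =>
    if s == "" then true
    else
      let d := PySem.Str.strip (PySem.Str.lower s)
      let suffixes := d.toList :: pvDotSuffixes d.toList
      suffixes.any (fun sfx => pvInfra.contains (String.ofList sfx))

-- ===== PRECONDITION & SPEC =====
def Spec_is_infra_domain_py (domain : Option String) (out : Bool) : Prop := out = is_infra_domain_py_alt domain
instance (domain : Option String) (out : Bool) : Decidable (Spec_is_infra_domain_py domain out) := by unfold Spec_is_infra_domain_py; infer_instance

-- ===== CLAIM (what is proved, stated in full; the proofs are below) =====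
def Claim_equal_is_infra_domain_py : Prop := ∀ (domain : Option String), Dom_is_infra_domain_py domain → Spec_is_infra_domain_py domain (is_infra_domain_py domain)

-- ===== LEMMAS AND PROOFS =====

-- ts is in pvDotSuffixes d exactly when '.' :: ts is a suffix of d (dot-boundary suffixes)
theorem mem_pvDotSuffixes (d ts : List Char) :
    ts ∈ pvDotSuffixes d ↔ ('.' :: ts) <:+ d := by
  unfold pvDotSuffixes
  simp only [List.mem_map, List.mem_filter, PySem.List.mem_enumerate_iff, beq_iff_eq]
  constructor
  · rintro ⟨p, ⟨⟨k, hk, rfl⟩, hdot⟩, rfl⟩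
    refine ⟨d.take k, ?_⟩
    rw [show ((0:Int) + (k:Int) + 1) = ((k+1 : Nat) : Int) by push_cast; ring]
    rw [PySem.List.slice_from_natCast]
    conv_rhs => rw [← List.take_append_drop k d]
    rw [List.drop_eq_getElem_cons hk]
    simp at hdot
    rw [hdot]
  · rintro ⟨pre, rfl⟩
    refine ⟨((0:Int) + (pre.length : Int), '.'), ⟨⟨pre.length, by simp, ?_⟩, rfl⟩, ?_⟩
    · simp [List.getElem_append_right]
    · rw [show ((0:Int) + (pre.length:Int) + 1) = ((pre.length+1 : Nat) : Int) by push_cast; ring]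
      rw [PySem.List.slice_from_natCast]
      simp [List.drop_append]

theorem core_eq (d : String) :
    (pvInfra.any (fun infra => d == infra || PySem.Str.endswith d ("." ++ infra)))
      = ((d.toList :: pvDotSuffixes d.toList).any (fun sfx => pvInfra.contains (String.ofList sfx))) := by
  rw [Bool.eq_iff_iff]
  simp only [List.any_eq_true, Bool.or_eq_true, beq_iff_eq, PySem.Str.endswith_eq,
    PySem.Chars.endswith_iff, String.toList_append, List.mem_cons, List.contains_iff_mem,
    mem_pvDotSuffixes]
  constructor
  · rintro ⟨t, ht, h | h⟩
    · exact ⟨d.toList, Or.inl rfl, by simpa [h]⟩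
    · exact ⟨t.toList, Or.inr (by simpa using h), by simpa⟩
  · rintro ⟨sfx, hsfx | hsfx, hmem⟩
    · subst hsfx
      exact ⟨String.ofList d.toList, hmem, Or.inl (by simp)⟩
    · exact ⟨String.ofList sfx, hmem, Or.inr (by simpa using hsfx)⟩

-- the `some s` branches of the two ports, stated once (definitional)
theorem portA_some (s : String) : is_infra_domain_py (some s) =
    (if s == "" then true else pvInfra.any (fun infra =>
      PySem.Str.strip (PySem.Str.lower s) == infra ||
      PySem.Str.endswith (PySem.Str.strip (PySem.Str.lower s)) ("." ++ infra))) := rfl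

theorem portB_some (s : String) : is_infra_domain_py_alt (some s) =
    (if s == "" then true else
      ((PySem.Str.strip (PySem.Str.lower s)).toList ::
        pvDotSuffixes (PySem.Str.strip (PySem.Str.lower s)).toList).any
          (fun sfx => pvInfra.contains (String.ofList sfx))) := rfl

-- ===== VERDICT (by name: the statement is the Claim_ definition above) =====
theorem is_infra_domain_py_spec : Claim_equal_is_infra_domain_py := by
  intro domain _
  show is_infra_domain_py domain = is_infra_domain_py_alt domain
  cases domain with
  | none => rfl
  | some s =>
    rw [portA_some, portB_some]
    exact if_congr Iff.rfl rfl (core_eq _)
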